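-- pv_equiv track=rewrite | github.com/mayank123-max/Leet_Code_Problems | CoinChange.py | count
-- ===== SOURCE A (Python) =====
-- def count(S, m, n ):
--     if (n == 0):
--         return 1
--     if (n < 0):
--         return 0
--     if (m <=0):
--         return 0
--     return count( S, m - 1, n ) + count( S, m, n-S[m-1] )
-- ===== SOURCE B (Python) =====
-- def count(S, m, n):
--     if n <= 0:
--         return 1 if n == 0 else 0
--     coins = S[:max(m, 0)]
--     if not coins:
--         return 0
--     ways = [1] + [0] * n
--     for c in coins:
--         if c > 0:
--             for x in range(c, n + 1):
--                 ways[x] += ways[x - c]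
--     return ways[n]
-- ===== Notes on version B (the rewrite author's own statement) =====
-- stated objective: faster
-- what changed: Replaced the exponential include/exclude recursion with a bottom-up one-dimensional dynamic-programming table over amounts 0..n (one pass per positive coin); intended as asymptotically faster — measured: A already times out on small inputs where B returns, so the probe could not read a ratio (faster:unconfirmed).
import Mathlib
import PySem

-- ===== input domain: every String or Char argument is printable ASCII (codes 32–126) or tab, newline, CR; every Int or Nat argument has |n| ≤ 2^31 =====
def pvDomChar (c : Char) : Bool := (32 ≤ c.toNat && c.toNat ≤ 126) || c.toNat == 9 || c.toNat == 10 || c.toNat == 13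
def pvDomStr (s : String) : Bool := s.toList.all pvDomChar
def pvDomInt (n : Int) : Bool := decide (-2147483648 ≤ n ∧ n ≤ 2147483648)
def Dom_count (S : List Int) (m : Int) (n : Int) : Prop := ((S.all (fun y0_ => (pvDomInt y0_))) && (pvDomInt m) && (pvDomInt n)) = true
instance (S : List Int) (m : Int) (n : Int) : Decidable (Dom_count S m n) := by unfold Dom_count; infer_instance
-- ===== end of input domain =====

-- B replaces A's exponential include/exclude recursion by a bottom-up one-dimensional
-- dynamic-programming table over amounts 0..n (one pass per positive coin); intended as
-- asymptotically faster (a timing run could not read a ratio: A times out where B returns).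

-- ===== PORT A =====
-- A's recursion carries a fuel parameter for totality; under Pre_count the fuel
-- m.toNat + n.toNat + 1 is never exhausted (every call decreases m or n) and S[m-1]
-- is always in range, so the getD default 0 is unreachable.
def count_go (fuel : Nat) (S : List Int) (m : Int) (n : Int) : Int :=
  match fuel with
  | 0 => 0
  | fuel + 1 =>
    if n = 0 then 1
    else if n < 0 then 0
    else if m ≤ 0 then 0
    else count_go fuel S (m - 1) n
         + count_go fuel S m (n - PySem.List.pyGetD S (m - 1) 0)

def count (S : List Int) (m : Int) (n : Int) : Int :=
  count_go (m.toNat + n.toNat + 1) S m n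

-- ===== PORT B =====
-- inner loop of Source B: 'for x in range(c, n+1): ways[x] += ways[x-c]'
-- (pyGetD/pySetD are the total forms of Python's list indexing; in range under Pre_count)
def coinPass (n : Int) (w : List Int) (c : Int) : List Int :=
  (PySem.List.pyRange c (n + 1) 1).foldl
    (fun w x =>
      PySem.List.pySetD w x (PySem.List.pyGetD w x 0 + PySem.List.pyGetD w (x - c) 0)) w

def count_alt (S : List Int) (m : Int) (n : Int) : Int :=
  if n ≤ 0 then (if n = 0 then 1 else 0)
  else
    let coins := PySem.List.slice S none (some (max m 0))
    if coins = [] then 0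
    else
      let ways : List Int := 1 :: List.replicate n.toNat 0
      let ways := coins.foldl (fun w c => if 0 < c then coinPass n w c else w) ways
      PySem.List.pyGetD ways n 0

-- ===== PRECONDITION & SPEC =====
-- Pre_count excludes exactly the inputs on which the Python A raises: with n > 0, an
-- index m beyond len(S) raises IndexError at S[m-1], and a non-positive coin among the
-- first m raises RecursionError (the amount never decreases); everywhere else A returns.
def Pre_count (S : List Int) (m : Int) (n : Int) : Prop :=
  n ≤ 0 ∨ (m ≤ (S.length : Int) ∧ ∀ c ∈ S.take m.toNat, 0 < c)
instance (S : List Int) (m : Int) (n : Int) : Decidable (Pre_count S m n) := by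
  unfold Pre_count; infer_instance

def pvWitness_count : List Int × Int × Int := ([1, 2, 5], 3, 11)

def Spec_count (S : List Int) (m : Int) (n : Int) (out : Int) : Prop := out = count_alt S m n
instance (S : List Int) (m : Int) (n : Int) (out : Int) : Decidable (Spec_count S m n out) := by
  unfold Spec_count; infer_instance

-- ===== CLAIM (what is proved, stated in full; the proofs are below) =====
def Claim_equal_count : Prop :=
  ∀ (S : List Int) (m : Int) (n : Int), Dom_count S m n → Pre_count S m n →
    Spec_count S m n (count S m n)

-- ===== LEMMAS AND PROOFS =====

-- the value one in-place coin pass (coin c) leaves at index k of a table w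
def mathF (w : List Int) (c : Nat) (k : Nat) : Int :=
  if _h : 0 < c ∧ c ≤ k then
    PySem.List.pyGetD w (k : Int) 0 + mathF w c (k - c)
  else PySem.List.pyGetD w (k : Int) 0
termination_by k
decreasing_by omega

lemma foldl_pySetD_length (f : List Int → Int → Int) :
    ∀ (l : List Int) (w : List Int),
      (l.foldl (fun w x => PySem.List.pySetD w x (f w x)) w).length = w.length := by
  intro l
  induction l with
  | nil => intro w; rfl
  | cons a l ih => intro w; simp only [List.foldl_cons]; rw [ih]; exact PySem.List.length_pySetD ..

-- invariant of the inner loop after processing range(c, c+t)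
lemma coinPass_seg (c : Int) (hc : 1 ≤ c) (w : List Int) :
    ∀ (t : Nat), (c + t ≤ (w.length : Int)) →
      ∀ i : Int, 0 ≤ i → i < (w.length : Int) →
        PySem.List.pyGetD
          ((PySem.List.pyRange c (c + t) 1).foldl
            (fun w x =>
              PySem.List.pySetD w x
                (PySem.List.pyGetD w x 0 + PySem.List.pyGetD w (x - c) 0)) w) i 0
        = if i < c + t then mathF w c.toNat i.toNat else PySem.List.pyGetD w i 0 := by
  intro t
  induction t with
  | zero =>
    intro _ i hi0 hilen
    have hrange : PySem.List.pyRange c (c + (0:Nat)) 1 = [] := by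
      rw [PySem.List.pyRange_one]
      simp
    rw [hrange]
    simp only [List.foldl_nil]
    split
    · rw [mathF]
      have hne : ¬ (0 < c.toNat ∧ c.toNat ≤ i.toNat) := by omega
      rw [dif_neg hne]
      congr 1
      omega
    · rfl
  | succ t ih =>
    intro hlen i hi0 hilen
    have hle : c + (t:Int) ≤ (w.length : Int) := by push_cast at hlen ⊢; omega
    have hsplit : PySem.List.pyRange c (c + ((t:Nat)+1:Nat)) 1
        = PySem.List.pyRange c (c + t) 1 ++ [c + t] := by
      have : (c + ((t:Nat)+1:Nat) : Int) = (c + t) + 1 := by push_cast; ring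
      rw [this, PySem.List.pyRange_one_succ_right (by omega)]
    rw [hsplit, List.foldl_append]
    simp only [List.foldl_cons, List.foldl_nil]
    set p := (PySem.List.pyRange c (c + (t:Int)) 1).foldl
        (fun w x => PySem.List.pySetD w x
          (PySem.List.pyGetD w x 0 + PySem.List.pyGetD w (x - c) 0)) w with hp
    have hplen : p.length = w.length := foldl_pySetD_length _ _ _
    have hj : (c + (t:Int)) = ((c.toNat + t : Nat) : Int) := by omega
    have hjlen : c.toNat + t < p.length := by rw [hplen]; omega
    have hi : i = ((i.toNat : Nat) : Int) := by omega
    have hstep : PySem.List.pyGetD (PySem.List.pySetD p (c + (t:Int))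
          (PySem.List.pyGetD p (c + (t:Int)) 0 + PySem.List.pyGetD p ((c + (t:Int)) - c) 0)) i 0
        = if i.toNat = c.toNat + t then
            (PySem.List.pyGetD p (c + (t:Int)) 0 + PySem.List.pyGetD p ((c + (t:Int)) - c) 0)
          else PySem.List.pyGetD p i 0 := by
      rw [hj, hi]
      exact PySem.List.pyGetD_pySetD_natCast p (c.toNat + t) i.toNat _ 0 hjlen
    rw [hstep]
    by_cases hcase : i.toNat = c.toNat + t
    · have hci : i = c + (t:Int) := by omega
      rw [if_pos hcase]
      have h1 : PySem.List.pyGetD p (c + (t:Int)) 0 = PySem.List.pyGetD w (c + (t:Int)) 0 := by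
        rw [ih hle (c + t) (by omega) (by omega), if_neg (lt_irrefl _)]
      have h2 : (c + (t:Int)) - c = (t:Int) := by ring
      have h3 : PySem.List.pyGetD p ((c + (t:Int)) - c) 0 = mathF w c.toNat t := by
        rw [h2, ih hle (t:Int) (by omega) (by omega), if_pos (by omega)]
        congr 1
      rw [h1, h3]
      have hcond : i < c + (((t:Nat)+1:Nat):Int) := by push_cast; omega
      rw [if_pos hcond, hcase]
      conv_rhs => rw [mathF]
      rw [dif_pos (show 0 < c.toNat ∧ c.toNat ≤ c.toNat + t by omega),
        Nat.add_sub_cancel_left, ← hj]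
    · rw [if_neg hcase]
      rw [ih hle i hi0 hilen]
      by_cases hlt : i < c + (t:Int)
      · rw [if_pos hlt, if_pos (show i < c + (((t:Nat)+1:Nat):Int) by omega)]
      · rw [if_neg hlt, if_neg (show ¬ i < c + (((t:Nat)+1:Nat):Int) by omega)]

lemma coinPass_length (n : Int) (w : List Int) (c : Int) :
    (coinPass n w c).length = w.length := foldl_pySetD_length _ _ _

lemma coinPass_char (n c : Int) (w : List Int) (hc : 1 ≤ c)
    (hlen : (w.length : Int) = n + 1) :
    ∀ i : Int, 0 ≤ i → i < (w.length : Int) →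
      PySem.List.pyGetD (coinPass n w c) i 0 = mathF w c.toNat i.toNat := by
  intro i hi0 hilen
  unfold coinPass
  by_cases hcn : c ≤ n + 1
  · have ht : n + 1 = c + ((n + 1 - c).toNat : Int) := by omega
    rw [ht]
    rw [coinPass_seg c hc w (n + 1 - c).toNat (by omega) i hi0 hilen,
      if_pos (by omega)]
  · have hempty : PySem.List.pyRange c (n + 1) 1 = [] := by
      rw [PySem.List.pyRange_one]
      have h0 : (n + 1 - c).toNat = 0 := by omega
      rw [h0]
      rfl
    rw [hempty]
    simp only [List.foldl_nil]
    rw [mathF, dif_neg (by omega)]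
    congr 1
    omega

-- the DP table of Source B after processing a coin list, and the value B reads off it
def rowT (N : Nat) (cs : List Int) : List Int :=
  cs.foldl (fun w c => if 0 < c then coinPass (N : Int) w c else w) (1 :: List.replicate N 0)

def valT (N : Nat) (cs : List Int) (x : Int) : Int :=
  if x < 0 then 0 else PySem.List.pyGetD (rowT N cs) x 0

lemma foldl_coinPass_length (N : Nat) :
    ∀ (cs : List Int) (w : List Int),
      (cs.foldl (fun w c => if 0 < c then coinPass (N : Int) w c else w) w).length
        = w.length := by
  intro cs
  induction cs with
  | nil => intro w; rfl
  | cons c cs ih =>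
    intro w
    simp only [List.foldl_cons]
    rw [ih]
    by_cases hc : 0 < c
    · rw [if_pos hc, coinPass_length]
    · rw [if_neg hc]

lemma valT_zero (N : Nat) (cs : List Int) (hpos : ∀ c ∈ cs, 0 < c) :
    valT N cs 0 = 1 := by
  unfold valT rowT
  rw [if_neg (by omega)]
  have main : ∀ (cs : List Int) (w : List Int), (∀ c ∈ cs, 0 < c) →
      w.length = N + 1 → PySem.List.pyGetD w 0 0 = 1 →
      PySem.List.pyGetD
        (cs.foldl (fun w c => if 0 < c then coinPass (N : Int) w c else w) w) 0 0 = 1 := by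
    intro cs
    induction cs with
    | nil => intro w _ _ h1; exact h1
    | cons c cs ih =>
      intro w hpos hlen h1
      simp only [List.foldl_cons]
      rw [if_pos (hpos c List.mem_cons_self)]
      apply ih _ (fun c hc => hpos c (List.mem_cons_of_mem _ hc))
      · rw [coinPass_length, hlen]
      · have hc : 1 ≤ c := hpos c List.mem_cons_self
        rw [coinPass_char (N : Int) c w hc (by rw [hlen]; push_cast; ring) 0 le_rfl
          (by rw [hlen]; push_cast; omega)]
        rw [mathF, dif_neg (by omega)]
        exact h1
  apply main cs _ hpos (by simp)
  rw [PySem.List.pyGetD_of_nonneg _ _ le_rfl]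
  rfl

lemma valT_nil (N : Nat) (x : Int) (hx : 0 ≤ x) :
    valT N [] x = if x = 0 then 1 else 0 := by
  unfold valT rowT
  rw [if_neg (by omega)]
  simp only [List.foldl_nil]
  rw [PySem.List.pyGetD_of_nonneg _ _ hx]
  by_cases h0 : x = 0
  · rw [h0, if_pos rfl]; rfl
  · rw [if_neg h0]
    obtain ⟨k, hk⟩ : ∃ k : Nat, x.toNat = k + 1 := ⟨x.toNat - 1, by omega⟩
    rw [hk]
    simp [List.getD, List.getElem?_replicate]
    split <;> rfl

lemma valT_snoc (N : Nat) (cs : List Int) (c x : Int) (hc : 1 ≤ c)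
    (hx : 1 ≤ x) (hxN : x ≤ (N : Int)) :
    valT N (cs ++ [c]) x = valT N cs x + valT N (cs ++ [c]) (x - c) := by
  have hrow : rowT N (cs ++ [c]) = coinPass (N : Int) (rowT N cs) c := by
    unfold rowT
    rw [List.foldl_append]
    simp only [List.foldl_cons, List.foldl_nil]
    rw [if_pos (by omega)]
  have hlenN : (rowT N cs).length = N + 1 := by
    unfold rowT
    rw [foldl_coinPass_length]
    simp
  have hlen : ((rowT N cs).length : Int) = (N : Int) + 1 := by
    rw [hlenN]; push_cast; ring
  have hchar := coinPass_char (N : Int) c (rowT N cs) hc hlen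
  have e1 : valT N (cs ++ [c]) x = mathF (rowT N cs) c.toNat x.toNat := by
    unfold valT
    rw [if_neg (by omega), hrow]
    exact hchar x (by omega) (by omega)
  by_cases hxc : c ≤ x
  · have e2 : valT N (cs ++ [c]) (x - c)
        = mathF (rowT N cs) c.toNat (x - c).toNat := by
      unfold valT
      rw [if_neg (by omega), hrow]
      exact hchar (x - c) (by omega) (by omega)
    rw [e1, e2, mathF, dif_pos (by omega)]
    unfold valT
    rw [if_neg (by omega)]
    congr 1
    · congr 1; omega
    · congr 1; omega
  · rw [e1, mathF, dif_neg (by omega)]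
    unfold valT
    rw [if_neg (by omega), if_pos (by omega)]
    have hcast : ((x.toNat : Nat) : Int) = x := by omega
    rw [hcast, add_zero]

lemma count_go_eq_valT (S : List Int) (N : Nat) :
    ∀ (fuel : Nat) (m x : Int), m.toNat + x.toNat + 1 ≤ fuel →
      m ≤ (S.length : Int) → (∀ c ∈ S.take m.toNat, 0 < c) → x ≤ (N : Int) →
      count_go fuel S m x = valT N (S.take m.toNat) x := by
  intro fuel
  induction fuel with
  | zero => intro m x h; omega
  | succ fuel ih =>
    intro m x hfuel hm hpos hxN
    simp only [count_go]
    by_cases hx0 : x = 0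
    · rw [if_pos hx0, hx0, valT_zero N _ hpos]
    · rw [if_neg hx0]
      by_cases hxneg : x < 0
      · rw [if_pos hxneg]
        unfold valT
        rw [if_pos hxneg]
      · rw [if_neg hxneg]
        by_cases hm0 : m ≤ 0
        · rw [if_pos hm0]
          have hz : m.toNat = 0 := by omega
          rw [hz, List.take_zero, valT_nil N x (by omega), if_neg hx0]
        · rw [if_neg hm0]
          have hm1 : 1 ≤ m := by omega
          set k : Nat := (m - 1).toNat with hk
          have hklen : k < S.length := by omega
          have hgc : PySem.List.pyGetD S (m - 1) 0 = S[k] := by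
            rw [PySem.List.pyGetD_of_nonneg _ _ (by omega)]
            exact List.getD_eq_getElem _ _ hklen
          have hmem : S[k] ∈ S.take m.toNat := by
            apply List.mem_take_iff_getElem.mpr
            exact ⟨k, by omega, rfl⟩
          have hc : 1 ≤ S[k] := hpos _ hmem
          have htake : S.take m.toNat = S.take k ++ [S[k]] := by
            have hsucc : m.toNat = k + 1 := by omega
            rw [hsucc, List.take_add_one]
            congr 1
            rw [List.getElem?_eq_getElem hklen]
            rfl
          have hpos' : ∀ c ∈ S.take (m - 1).toNat, 0 < c := by
            intro c hcmem
            apply hpos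
            rw [htake]
            exact List.mem_append_left _ hcmem
          rw [hgc]
          rw [ih (m - 1) x (by omega) (by omega) hpos' hxN]
          rw [ih m (x - S[k]) (by omega) hm hpos (by omega)]
          rw [htake]
          have hsn := valT_snoc N (S.take k) S[k] x hc (by omega) hxN
          rw [show (m - 1).toNat = k from rfl]
          omega

lemma count_eq_alt (S : List Int) (m : Int) (n : Int)
    (hpre : Pre_count S m n) : count S m n = count_alt S m n := by
  unfold Pre_count at hpre
  unfold count count_alt
  by_cases hn0 : n ≤ 0
  · rw [if_pos hn0]
    simp only [count_go]
    by_cases hz : n = 0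
    · rw [if_pos hz, if_pos hz]
    · rw [if_neg hz, if_neg hz, if_pos (by omega)]
  · rw [if_neg hn0]
    rcases hpre with h | ⟨hm, hpos⟩
    · omega
    · have hslice : PySem.List.slice S none (some (max m 0)) = S.take m.toNat := by
        rw [PySem.List.slice_to S (le_max_right m 0)]
        congr 1
        omega
      have hNn : ((n.toNat : Nat) : Int) = n := by omega
      simp only [hslice]
      rw [count_go_eq_valT S n.toNat (m.toNat + n.toNat + 1) m n (by omega) hm hpos (by omega)]
      by_cases hnil : S.take m.toNat = []
      · rw [if_pos hnil, hnil, valT_nil n.toNat n (by omega), if_neg (by omega)]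
      · rw [if_neg hnil]
        unfold valT rowT
        rw [if_neg (by omega), hNn]

-- ===== VERDICT (by name: the statement is the Claim_ definition above) =====
theorem count_spec : Claim_equal_count := by
  intro S m n _ hpre
  unfold Spec_count
  exact count_eq_alt S m n hpre
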